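-- pv_equiv track=rewrite | github.com/egasol/TrackingDeveloper | AnnotationsCreator.py | annotate_file
-- ===== SOURCE A (Python) =====
-- def annotate_file(frame_from, frame_to, annotation_list):
--     annotated_file = {}
--     for frame in range(frame_from, frame_to):
--         frame_annotations = []
--         for annotation in annotation_list:
--             box = annotation.get(frame)
--             if box is not None:
--                 frame_annotations.append(box)
--         annotated_file[frame] = frame_annotations
--
--     return annotated_file
-- ===== SOURCE B (Python) =====
-- def annotate_file(frame_from, frame_to, annotation_list):
--     # One pass over the annotations: pre-create the empty per-frame lists,
--     # then scatter each annotation's in-range (frame, box) items.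
--     annotated_file = {frame: [] for frame in range(frame_from, frame_to)}
--     for annotation in annotation_list:
--         for frame, box in annotation.items():
--             if frame_from <= frame < frame_to:
--                 annotated_file[frame].append(box)
--     return annotated_file
-- ===== Notes on version B (the rewrite author's own statement) =====
-- stated objective: faster
-- what changed: Instead of scanning every annotation dict once per frame (frames x annotations lookups), B pre-creates the empty list for each frame and makes a single scatter pass over the annotations' items, appending each in-range box to its frame's list.
import Mathlib
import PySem

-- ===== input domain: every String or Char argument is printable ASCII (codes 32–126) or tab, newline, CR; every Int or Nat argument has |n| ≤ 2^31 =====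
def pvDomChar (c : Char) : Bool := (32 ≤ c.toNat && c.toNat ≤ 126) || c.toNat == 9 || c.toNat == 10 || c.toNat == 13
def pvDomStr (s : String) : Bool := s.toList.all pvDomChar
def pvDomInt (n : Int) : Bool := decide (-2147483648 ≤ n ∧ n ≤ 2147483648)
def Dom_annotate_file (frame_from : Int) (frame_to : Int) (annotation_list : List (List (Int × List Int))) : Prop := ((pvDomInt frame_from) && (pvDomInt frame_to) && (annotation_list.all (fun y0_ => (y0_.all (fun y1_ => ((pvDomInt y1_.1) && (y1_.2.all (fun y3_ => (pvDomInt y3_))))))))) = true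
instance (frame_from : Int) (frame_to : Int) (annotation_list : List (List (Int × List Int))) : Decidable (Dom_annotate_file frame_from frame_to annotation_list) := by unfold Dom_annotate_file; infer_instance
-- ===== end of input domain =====

-- B replaces A's per-frame scan of all annotation dicts by one scatter pass over the
-- annotations' items into pre-created per-frame lists (objective: faster).

-- ===== PORT A =====
def annotate_file (frame_from : Int) (frame_to : Int) (annotation_list : List (List (Int × List Int))) : List (Int × List (List Int)) :=
  ((PySem.List.pyRange frame_from frame_to 1).foldl
    (fun d frame =>
      d.insert frame
        (annotation_list.foldl (fun frame_annotations annotation =>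
          match (PySem.Dict.mk annotation).get? frame with
          | some box => frame_annotations ++ [box]
          | none => frame_annotations) []))
    PySem.Dict.empty).items

-- ===== PORT B =====
def annotate_file_alt (frame_from : Int) (frame_to : Int) (annotation_list : List (List (Int × List Int))) : List (Int × List (List Int)) :=
  let init : PySem.Dict Int (List (List Int)) :=
    (PySem.List.pyRange frame_from frame_to 1).foldl (fun d frame => d.insert frame []) PySem.Dict.empty
  (annotation_list.foldl
    (fun d annotation =>
      annotation.foldl
        (fun d p =>
          if frame_from ≤ p.1 ∧ p.1 < frame_to then d.modify p.1 [] (fun bs => bs ++ [p.2]) else d)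
        d)
    init).items

-- ===== PRECONDITION & SPEC =====
-- Pre_ excludes association lists in which some annotation has duplicate frame keys: such
-- lists do not encode any Python dict (Python dicts cannot contain duplicate keys), so the
-- encoding's behaviour there is unspecified and the two ports may disagree.
def Pre_annotate_file (frame_from : Int) (frame_to : Int) (annotation_list : List (List (Int × List Int))) : Prop :=
  ∀ annotation ∈ annotation_list, (annotation.map Prod.fst).Nodup
instance (frame_from : Int) (frame_to : Int) (annotation_list : List (List (Int × List Int))) : Decidable (Pre_annotate_file frame_from frame_to annotation_list) := by unfold Pre_annotate_file; infer_instance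

def pvWitness_annotate_file : Int × Int × (List (List (Int × List Int))) :=
  (0, 2, [[(0, [1, 2]), (1, [3])], [(1, [4])]])

def Spec_annotate_file (frame_from : Int) (frame_to : Int) (annotation_list : List (List (Int × List Int))) (out : List (Int × List (List Int))) : Prop := out = annotate_file_alt frame_from frame_to annotation_list
instance (frame_from : Int) (frame_to : Int) (annotation_list : List (List (Int × List Int))) (out : List (Int × List (List Int))) : Decidable (Spec_annotate_file frame_from frame_to annotation_list out) := by unfold Spec_annotate_file; infer_instance

-- ===== CLAIM (what is proved, stated in full; the proofs are below) =====
def Claim_equal_annotate_file : Prop := ∀ (frame_from : Int) (frame_to : Int) (annotation_list : List (List (Int × List Int))), Dom_annotate_file frame_from frame_to annotation_list → Pre_annotate_file frame_from frame_to annotation_list → Spec_annotate_file frame_from frame_to annotation_list (annotate_file frame_from frame_to annotation_list)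

-- ===== LEMMAS AND PROOFS =====

-- inner loop of A: collecting the boxes of one frame is a filterMap over the annotations
theorem foldl_get_eq_filterMap (annotation_list : List (List (Int × List Int))) (frame : Int)
    (acc : List (List Int)) :
    annotation_list.foldl (fun frame_annotations annotation =>
      match (PySem.Dict.mk annotation).get? frame with
      | some box => frame_annotations ++ [box]
      | none => frame_annotations) acc
    = acc ++ annotation_list.filterMap (fun annotation => (PySem.Dict.mk annotation).get? frame) := by
  induction annotation_list generalizing acc with
  | nil => simp
  | cons ann al ih =>
    simp only [List.foldl_cons, List.filterMap_cons]
    cases h : (PySem.Dict.mk ann).get? frame with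
    | none => simp [ih]
    | some box => simp [ih]

-- building a dict over the (distinct, fresh) keys of a range appends one item per frame
theorem items_range_build (a b : Int) (F : Int → List (List Int)) :
    ((PySem.List.pyRange a b 1).foldl (fun d frame => d.insert frame (F frame)) PySem.Dict.empty).items
    = (PySem.List.pyRange a b 1).map (fun frame => (frame, F frame)) := by
  have h := PySem.Dict.items_foldl_insert_fresh (PySem.List.pyRange a b 1) id F PySem.Dict.empty
    (by intro x hx; simp [PySem.Dict.contains_empty]) (by simpa using PySem.List.nodup_pyRange_one a b)
  simpa [id] using h

-- with unique keys, the pairs of an assoc list at one key are exactly its dict lookup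
theorem filter_key_eq_get?_toList (ps : List (Int × List Int)) (frame : Int)
    (h : (ps.map Prod.fst).Nodup) :
    (ps.filter (fun p => p.1 == frame)).map Prod.snd
    = ((PySem.Dict.mk ps).get? frame).toList := by
  induction ps with
  | nil => simp [PySem.Dict.get?]
  | cons p ps ih =>
    simp only [List.map_cons, List.nodup_cons] at h
    by_cases hp : p.1 = frame
    · have hnil : ps.filter (fun q => q.1 == frame) = [] := by
        rw [List.filter_eq_nil_iff]
        intro q hq hq'
        exact h.1 (by rw [hp, ← (beq_iff_eq).mp hq']; exact List.mem_map_of_mem hq)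
      simp [PySem.Dict.get?, hp, hnil]
    · have hb : (p.1 == frame) = false := by simp [hp]
      rw [List.filter_cons_of_neg (by simp [hp]), ih h.2]
      simp [PySem.Dict.get?, hb]

-- one modify step on a dict whose items are the frames of [a, b) with values g
theorem items_modify_range (a b : Int) (g : Int → List (List Int))
    (d : PySem.Dict Int (List (List Int)))
    (hd : d.items = (PySem.List.pyRange a b 1).map (fun frame => (frame, g frame)))
    (k : Int) (hk : a ≤ k ∧ k < b) (box : List Int) :
    (d.modify k [] (fun bs => bs ++ [box])).items
    = (PySem.List.pyRange a b 1).map (fun frame => (frame, if frame = k then g frame ++ [box] else g frame)) := by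
  have hkeys : d.keys = PySem.List.pyRange a b 1 := by
    simp [PySem.Dict.keys, hd, List.map_map, Function.comp_def]
  have hmemk : k ∈ d.keys := by rw [hkeys]; exact PySem.List.mem_pyRange_one.mpr hk
  have hcont : d.contains k = true := by
    rw [PySem.Dict.contains_eq_decide_mem_keys]; simpa using hmemk
  have hnodup : d.keys.Nodup := by rw [hkeys]; exact PySem.List.nodup_pyRange_one a b
  have hitem : (k, g k) ∈ d.items := by
    rw [hd]; exact List.mem_map_of_mem (PySem.List.mem_pyRange_one.mpr hk)
  have hgetD : d.getD k [] = g k := PySem.Dict.getD_of_mem_items d hitem hnodup []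
  show (d.insert k (d.getD k [] ++ [box])).items = _
  rw [hgetD, PySem.Dict.items_insert_of_contains _ _ hcont, hd, List.map_map]
  apply List.map_congr_left
  intro frame _
  by_cases hfk : frame = k
  · subst hfk; simp
  · have : (frame == k) = false := by simp [hfk]
    simp [Function.comp, this, hfk]

-- inner loop of B: scattering one annotation's pairs appends, per frame, the pairs at that key
theorem inner_scatter (a b : Int) (ps : List (Int × List Int)) :
    ∀ (g : Int → List (List Int)) (d : PySem.Dict Int (List (List Int))),
    d.items = (PySem.List.pyRange a b 1).map (fun frame => (frame, g frame)) →
    (ps.foldl (fun d p =>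
        if a ≤ p.1 ∧ p.1 < b then d.modify p.1 [] (fun bs => bs ++ [p.2]) else d) d).items
    = (PySem.List.pyRange a b 1).map
        (fun frame => (frame, g frame ++ (ps.filter (fun p => p.1 == frame)).map Prod.snd)) := by
  induction ps with
  | nil => intro g d hd; simpa using hd
  | cons p ps ih =>
    intro g d hd
    simp only [List.foldl_cons]
    by_cases hp : a ≤ p.1 ∧ p.1 < b
    · rw [if_pos hp]
      have hstep := items_modify_range a b g d hd p.1 hp p.2
      rw [ih (fun frame => if frame = p.1 then g frame ++ [p.2] else g frame) _ hstep]
      apply List.map_congr_left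
      intro frame _
      by_cases hfk : frame = p.1
      · subst hfk; simp
      · have : (p.1 == frame) = false := by simp [Ne.symm hfk]
        simp [this, hfk]
    · rw [if_neg hp]
      rw [ih g d hd]
      apply List.map_congr_left
      intro frame hframe
      have hfr := PySem.List.mem_pyRange_one.mp hframe
      have : (p.1 == frame) = false := by
        simp only [beq_eq_false_iff_ne, ne_eq]
        intro he; exact hp (he ▸ hfr)
      simp [this]

-- outer loop of B: scattering all annotations appends each frame's filterMap of lookups
theorem outer_scatter (a b : Int) (al : List (List (Int × List Int))) :
    ∀ (g : Int → List (List Int)) (d : PySem.Dict Int (List (List Int))),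
    (∀ ann ∈ al, (ann.map Prod.fst).Nodup) →
    d.items = (PySem.List.pyRange a b 1).map (fun frame => (frame, g frame)) →
    (al.foldl (fun d annotation =>
        annotation.foldl (fun d p =>
          if a ≤ p.1 ∧ p.1 < b then d.modify p.1 [] (fun bs => bs ++ [p.2]) else d) d) d).items
    = (PySem.List.pyRange a b 1).map
        (fun frame => (frame, g frame ++ al.filterMap (fun annotation => (PySem.Dict.mk annotation).get? frame))) := by
  induction al with
  | nil => intro g d _ hd; simpa using hd
  | cons ann al ih =>
    intro g d hnd hd
    simp only [List.foldl_cons]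
    have hstep := inner_scatter a b ann g d hd
    have hstep' : (ann.foldl (fun d p =>
        if a ≤ p.1 ∧ p.1 < b then d.modify p.1 [] (fun bs => bs ++ [p.2]) else d) d).items
        = (PySem.List.pyRange a b 1).map
            (fun frame => (frame, g frame ++ ((PySem.Dict.mk ann).get? frame).toList)) := by
      rw [hstep]
      apply List.map_congr_left
      intro frame _
      rw [filter_key_eq_get?_toList ann frame (hnd ann (List.mem_cons_self ..))]
    rw [ih (fun frame => g frame ++ ((PySem.Dict.mk ann).get? frame).toList) _
        (fun x hx => hnd x (List.mem_cons_of_mem _ hx)) hstep']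
    apply List.map_congr_left
    intro frame _
    simp only [List.filterMap_cons]
    cases h : (PySem.Dict.mk ann).get? frame with
    | none => simp
    | some box => simp

-- ===== VERDICT (by name: the statement is the Claim_ definition above) =====
theorem annotate_file_spec : Claim_equal_annotate_file := by
  intro frame_from frame_to annotation_list _ hpre
  unfold Spec_annotate_file annotate_file annotate_file_alt
  rw [items_range_build frame_from frame_to
      (fun frame => annotation_list.foldl (fun fa annotation =>
        match (PySem.Dict.mk annotation).get? frame with
        | some box => fa ++ [box]
        | none => fa) [])]
  rw [outer_scatter frame_from frame_to annotation_list (fun _ => []) _ hpre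
      (items_range_build frame_from frame_to (fun _ => []))]
  apply List.map_congr_left
  intro frame _
  rw [foldl_get_eq_filterMap]
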